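-- pv_equiv track=rewrite | github.com/IanChen15/Mirror | GoogleTxt.py | split_word
-- ===== SOURCE A (Python) =====
-- def split_word(s: str):
--     lst = []
--     break_char = [' ', ',', '\t', '.']
--     word = ''
--     for i in range(len(s)):
--         word = word + s[i]
--         if s[i] in break_char:
--             lst.append(word)
--             word = ""
--     if len(word) > 0:
--         lst.append(word)
--     return lst
-- ===== SOURCE B (Python) =====
-- def split_word(s: str):
--     out = []
--     while s:
--         k = next((i for i, c in enumerate(s) if c in ' ,.\t'), None)
--         if k is None:
--             out.append(s)
--             break
--         out.append(s[:k + 1])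
--         s = s[k + 1:]
--     return out
-- ===== Notes on version B (the rewrite author's own statement) =====
-- stated objective: faster
-- what changed: B consumes the string chunk by chunk (find the first delimiter, cut the token off with a slice, continue on the remainder) instead of A's char-by-char loop that grows an accumulator string and flushes it at each delimiter.
import Mathlib
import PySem

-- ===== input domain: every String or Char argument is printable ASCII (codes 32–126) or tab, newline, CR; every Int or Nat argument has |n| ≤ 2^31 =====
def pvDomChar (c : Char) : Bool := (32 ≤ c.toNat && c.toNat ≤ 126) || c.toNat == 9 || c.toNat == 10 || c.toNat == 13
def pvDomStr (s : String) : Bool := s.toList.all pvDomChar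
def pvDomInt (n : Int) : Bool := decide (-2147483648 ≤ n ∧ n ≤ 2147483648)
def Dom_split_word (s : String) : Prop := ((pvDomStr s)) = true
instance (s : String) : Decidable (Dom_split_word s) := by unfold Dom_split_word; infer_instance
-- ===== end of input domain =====

-- B rewrites A's char-by-char accumulator loop as a chunking loop: find the first
-- delimiter, slice the token off, continue on the remainder (objective: alternative).

-- ===== PORT A =====
-- A: fold over the characters keeping (lst, word); flush word at each break char.
def split_word (s : String) : List String :=
  let r := s.toList.foldl
    (fun (st : List (List Char) × List Char) c =>
      let word := st.2 ++ [c]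
      if c ∈ [' ', ',', '\t', '.'] then (st.1 ++ [word], []) else (st.1, word))
    ([], [])
  (if r.2.length > 0 then r.1 ++ [r.2] else r.1).map (fun w => String.ofList w)

-- ===== PORT B =====
def pvIsBreak (c : Char) : Bool := c = ' ' || c = ',' || c = '\t' || c = '.'

-- B's loop body: find first delimiter index, cut the chunk off, recurse on the rest.
def pvChunks (cs : List Char) : List (List Char) :=
  match h : cs.findIdx? pvIsBreak with
  | none => if cs.isEmpty then [] else [cs]
  | some k => cs.take (k + 1) :: pvChunks (cs.drop (k + 1))
termination_by cs.length
decreasing_by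
  have hk := List.findIdx?_eq_some_iff_findIdx_eq.mp h
  have : 0 < cs.length := lt_of_le_of_lt (Nat.zero_le _) hk.1
  simp [List.length_drop]; omega

def split_word_alt (s : String) : List String :=
  (pvChunks s.toList).map (fun w => String.ofList w)

-- ===== PRECONDITION & SPEC =====
def Spec_split_word (s : String) (out : List String) : Prop := out = split_word_alt s
instance (s : String) (out : List String) : Decidable (Spec_split_word s out) := by unfold Spec_split_word; infer_instance

-- ===== CLAIM (what is proved, stated in full; the proofs are below) =====
def Claim_equal_split_word : Prop := ∀ (s : String), Dom_split_word s → Spec_split_word s (split_word s)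

-- ===== LEMMAS AND PROOFS =====

-- A's loop as a plain recursion on the characters, with the pending word as state.
def pvAGo (word : List Char) : List Char → List (List Char)
  | [] => if word.length > 0 then [word] else []
  | c :: cs =>
      if pvIsBreak c then (word ++ [c]) :: pvAGo [] cs else pvAGo (word ++ [c]) cs

theorem pvIsBreak_iff (c : Char) : pvIsBreak c = true ↔ c ∈ [' ', ',', '\t', '.'] := by
  simp [pvIsBreak]; tauto

-- the defining equation of pvChunks, with the dependent match discharged
theorem pvChunks_unfold (cs : List Char) :
    pvChunks cs =
      match cs.findIdx? pvIsBreak with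
      | none => if cs.isEmpty then [] else [cs]
      | some k => cs.take (k + 1) :: pvChunks (cs.drop (k + 1)) := by
  rw [pvChunks]
  cases cs.findIdx? pvIsBreak <;> simp

-- the foldl with accumulator equals acc ++ pvAGo word cs after the final flush
theorem pvFoldl_eq (cs : List Char) : ∀ (acc : List (List Char)) (word : List Char),
    (let r := cs.foldl
        (fun (st : List (List Char) × List Char) c =>
          let word := st.2 ++ [c]
          if c ∈ [' ', ',', '\t', '.'] then (st.1 ++ [word], []) else (st.1, word))
        (acc, word)
      if r.2.length > 0 then r.1 ++ [r.2] else r.1) = acc ++ pvAGo word cs := by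
  induction cs with
  | nil => intro acc word; by_cases h : word.length > 0 <;> simp [pvAGo, h]
  | cons c cs ih =>
      intro acc word
      by_cases h : pvIsBreak c = true
      · have h' : c ∈ [' ', ',', '\t', '.'] := (pvIsBreak_iff c).mp h
        simp only [List.foldl_cons, if_pos h', pvAGo, if_pos h]
        rw [ih]; simp
      · have h' : c ∉ [' ', ',', '\t', '.'] := fun hm => h ((pvIsBreak_iff c).mpr hm)
        simp only [List.foldl_cons, if_neg h', pvAGo, if_neg h]
        exact ih _ _

-- pvAGo with pending word equals the chunk decomposition with word prepended
theorem pvAGo_eq_chunks (cs : List Char) : ∀ (word : List Char),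
    pvAGo word cs =
      match cs.findIdx? pvIsBreak with
      | none => if (word ++ cs).isEmpty then [] else [word ++ cs]
      | some k => (word ++ cs.take (k + 1)) :: pvChunks (cs.drop (k + 1)) := by
  induction cs with
  | nil =>
      intro word
      cases word <;> simp [pvAGo]
  | cons c cs ih =>
      intro word
      by_cases h : pvIsBreak c = true
      · simp only [pvAGo, h, if_true]
        rw [ih []]
        simp only [List.nil_append]
        rw [← pvChunks_unfold]
        simp [List.findIdx?_cons, h]
      · simp only [pvAGo, List.findIdx?_cons, h]
        rw [ih (word ++ [c])]
        cases hfi : cs.findIdx? pvIsBreak with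
        | none => simp
        | some k => simp [List.take_succ_cons, List.drop_succ_cons]

theorem pvChunks_eq (cs : List Char) : pvAGo [] cs = pvChunks cs := by
  rw [pvAGo_eq_chunks, pvChunks_unfold]
  cases hfi : cs.findIdx? pvIsBreak <;> simp

-- ===== VERDICT (by name: the statement is the Claim_ definition above) =====
theorem split_word_spec : Claim_equal_split_word := by
  intro s _
  unfold Spec_split_word split_word split_word_alt
  rw [← pvChunks_eq]
  exact congrArg (List.map fun w => String.ofList w)
    ((pvFoldl_eq s.toList [] []).trans (List.nil_append _))
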